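-- pv_equiv track=rewrite | github.com/jukkakansanaho/static-site-generator | src/block_parser.py | text_to_heading_type
-- ===== SOURCE A (Python) =====
-- def text_to_heading_type(text):
--     """Finds heading type (H1-H6) from Markdown text.
--         Return HTML heading tag name or None if not a heading.
--     Args:
--         text (str): A string to analyse.
--
--     Returns:
--         str or None: HTML heading tag (H1-H6) or None if not a heading.
--     """
--     text = text.strip()
--
--     if not text.startswith("#"):
--         return None
--
--     heading_symbol_count = 0
--     for char in text:
--         if char == "#":
--             heading_symbol_count += 1
--         else:
--             break
--     if len(text) <= heading_symbol_count or text[heading_symbol_count] != " ":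
--         return None
--
--     return f"h{heading_symbol_count}"
-- ===== SOURCE B (Python) =====
-- def text_to_heading_type(text):
--     parts = text.strip().split(" ", 1)
--     if len(parts) < 2:
--         return None
--     prefix = parts[0]
--     if prefix and prefix == "#" * len(prefix):
--         return f"h{len(prefix)}"
--     return None
-- ===== Notes on version B (the rewrite author's own statement) =====
-- stated objective: alternative
-- what changed: B does no character scanning of its own: it tokenizes the stripped text with a maxsplit-1 split on a space and validates the first token by string equality against a constructed hash-replicate of its length, instead of A's for/break loop that counts leading hashes and then indexes the character after them.
import Mathlib
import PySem

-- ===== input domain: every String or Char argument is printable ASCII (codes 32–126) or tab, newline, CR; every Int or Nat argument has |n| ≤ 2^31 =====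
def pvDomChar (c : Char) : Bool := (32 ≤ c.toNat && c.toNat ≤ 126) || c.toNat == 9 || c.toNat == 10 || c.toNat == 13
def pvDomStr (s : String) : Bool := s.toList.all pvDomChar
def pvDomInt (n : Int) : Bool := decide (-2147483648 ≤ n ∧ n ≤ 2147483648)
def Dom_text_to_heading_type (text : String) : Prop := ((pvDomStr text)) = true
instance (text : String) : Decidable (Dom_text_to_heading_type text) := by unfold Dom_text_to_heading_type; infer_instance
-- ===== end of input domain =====

-- B does no character scanning of its own: it tokenizes with a maxsplit-1 split on a space and
-- validates the first token by string equality against a constructed hash-replicate (alternative decomposition, same cost).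

-- ===== PORT A =====
-- the for/break loop counting leading '#' characters
def pvCountHashes : List Char → Nat
  | [] => 0
  | c :: cs => if c = '#' then pvCountHashes cs + 1 else 0


def text_to_heading_type (text : String) : Option String :=
  let t := PySem.Str.strip text
  if PySem.Str.startswith t "#" = false then none
  else
    let cnt := pvCountHashes t.toList
    if PySem.Str.len t ≤ (cnt : Int) ∨ PySem.Str.pyGet? t (cnt : Int) ≠ some ' ' then none
    else some ("h" ++ PySem.Int.toStr (cnt : Int))


-- ===== PORT B =====
-- the split separator is a nonempty literal, so splitMax? never returns none; its Option is read with .getD []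
def text_to_heading_type_alt (text : String) : Option String :=
  let parts := (PySem.Str.splitMax? (PySem.Str.strip text) " " 1).getD []
  if parts.length < 2 then none
  else
    let prefixS := (PySem.List.pyGet? parts 0).getD ""
    if prefixS ≠ "" ∧ prefixS = String.ofList (PySem.List.pyRepeat "#".toList (PySem.Str.len prefixS)) then
      some ("h" ++ PySem.Int.toStr (PySem.Str.len prefixS))
    else none


-- ===== PRECONDITION & SPEC =====
def Spec_text_to_heading_type (text : String) (out : Option String) : Prop := out = text_to_heading_type_alt text
instance (text : String) (out : Option String) : Decidable (Spec_text_to_heading_type text out) := by unfold Spec_text_to_heading_type; infer_instance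

-- ===== CLAIM =====
def Claim_equal_text_to_heading_type : Prop := ∀ (text : String), Dom_text_to_heading_type text → Spec_text_to_heading_type text (text_to_heading_type text)

-- ===== LEMMAS AND PROOFS =====
theorem go_zero (sep : List Char) (fuel : Nat) (l cur : List Char) (acc : List (List Char)) :
    PySem.Chars.splitOnMax.go sep fuel 0 l cur acc = ((cur.reverse ++ l) :: acc).reverse := by
  cases fuel with
  | zero => simp [PySem.Chars.splitOnMax.go]
  | succ f => cases l <;> simp [PySem.Chars.splitOnMax.go]

theorem go_one (l : List Char) (fuel : Nat) (cur : List Char) (acc : List (List Char))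
    (h : l.length < fuel) :
    PySem.Chars.splitOnMax.go [' '] fuel 1 l cur acc =
      match l.dropWhile (· ≠ ' ') with
      | [] => ((cur.reverse ++ l) :: acc).reverse
      | _ :: rest => (rest :: (cur.reverse ++ l.takeWhile (· ≠ ' ')) :: acc).reverse := by
  induction l generalizing fuel cur with
  | nil =>
    cases fuel with
    | zero => omega
    | succ f => simp [PySem.Chars.splitOnMax.go]
  | cons c cs ih =>
    cases fuel with
    | zero => simp at h
    | succ f =>
      by_cases hc : c = ' '
      · subst hc
        simp [PySem.Chars.splitOnMax.go, List.isPrefixOf, go_zero, List.dropWhile]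
      · have : [' '].isPrefixOf (c :: cs) = false := by
          simp [List.isPrefixOf]; exact fun h => absurd h.symm hc
        simp only [PySem.Chars.splitOnMax.go, this, if_neg (by omega : ¬ (1 = 0))]
        rw [ih f (c :: cur) (by simp at h ⊢; omega)]
        simp [List.dropWhile, List.takeWhile, hc]

theorem split1 (L : List Char) :
    PySem.Chars.splitOnMax L [' '] 1 =
      match L.dropWhile (· ≠ ' ') with
      | [] => [L]
      | _ :: rest => [L.takeWhile (· ≠ ' '), rest] := by
  rw [PySem.Chars.splitOnMax, if_neg (by omega)]
  norm_num
  rw [go_one L (L.length + 1) [] [] (by omega)]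
  rcases hd : L.dropWhile (· ≠ ' ') with _ | ⟨c, rest⟩ <;> simp only [ne_eq, decide_not] at hd ⊢ <;> simp [hd]

theorem pvCountHashes_lt (L : List Char) (i : Nat) (h : i < pvCountHashes L) :
    L[i]? = some '#' := by
  induction L generalizing i with
  | nil => simp [pvCountHashes] at h
  | cons c cs ih =>
    by_cases hc : c = '#'
    · cases i with
      | zero => simp [hc]
      | succ j =>
        simp [pvCountHashes, hc] at h
        simpa using ih j (by omega)
    · simp [pvCountHashes, hc] at h

theorem pvCountHashes_replicate (k : Nat) (l : List Char) :
    pvCountHashes (List.replicate k '#' ++ l) = k + pvCountHashes l := by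
  induction k with
  | zero => simp
  | succ j ih => simp [List.replicate_succ, pvCountHashes, ih]; omega

theorem pvDropWhileHead {p : Char → Bool} {l r : List Char} {c : Char}
    (h : l.dropWhile p = c :: r) : p c = false := by
  induction l with
  | nil => simp at h
  | cons a as ih =>
    by_cases hp : p a
    · rw [List.dropWhile_cons_of_pos hp] at h; exact ih h
    · rw [List.dropWhile_cons_of_neg hp] at h
      cases h; simpa using hp


set_option maxHeartbeats 1600000 in
theorem pvCore (L : List Char) :
    (if PySem.Chars.startswith L ['#'] = false then none
     else if (L.length : Int) ≤ (pvCountHashes L : Int) ∨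
         PySem.Chars.pyGet? L ((pvCountHashes L : Nat) : Int) ≠ some ' ' then none
     else some ("h" ++ PySem.Int.toStr ((pvCountHashes L : Nat) : Int))) =
    (let parts := List.map String.ofList (PySem.Chars.splitOnMax L [' '] 1)
     if parts.length < 2 then none
     else
       let prefixS := (PySem.List.pyGet? parts 0).getD ""
       if prefixS ≠ "" ∧ prefixS = String.ofList (PySem.List.pyRepeat ['#'] (prefixS.toList.length : Int)) then
         some ("h" ++ PySem.Int.toStr (prefixS.toList.length : Int))
       else none) := by
  rw [split1]
  rcases hd : L.dropWhile (· ≠ ' ') with _ | ⟨c, rest⟩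
  · -- no space in L: B gives one part → none; A's inner condition always holds
    simp only [List.map_cons, List.map_nil, List.length_cons, List.length_nil]
    rw [if_pos (show (0:Nat)+1 < 2 by omega)]
    have hall : ∀ x ∈ L, x ≠ ' ' := by
      intro x hx
      have := (List.dropWhile_eq_nil_iff).1 hd x hx
      simpa using this
    by_cases hs : PySem.Chars.startswith L ['#'] = false
    · rw [if_pos hs]
    · rw [if_neg hs, if_pos]
      by_cases hlen : pvCountHashes L < L.length
      · right
        rw [PySem.Chars.pyGet?_eq_listPyGet?, PySem.List.pyGet?_natCast,
          List.getElem?_eq_getElem hlen]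
        intro hcontra
        exact hall _ (List.getElem_mem hlen) (by simpa using hcontra)
      · left
        omega
  · -- first space exists: c = ' ', parts = [takeWhile, rest]
    have hc : c = ' ' := by simpa using pvDropWhileHead hd
    subst hc
    set t := L.takeWhile (· ≠ ' ') with ht
    have hLt : t ++ ' ' :: rest = L := by rw [ht, ← hd]; exact List.takeWhile_append_dropWhile
    have htmem : ∀ x ∈ t, x ≠ ' ' := fun x hx => by simpa using List.mem_takeWhile_imp hx
    simp only [List.map_cons, List.map_nil, List.length_cons, List.length_nil]
    rw [if_neg (show ¬ ((0:Nat)+1+1 < 2) by omega)]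
    have hget : (PySem.List.pyGet? [String.ofList t, String.ofList rest] (0:Int)).getD "" = String.ofList t := by
      simp [PySem.List.pyGet?, PySem.List.pyIdx?]
    rw [hget, PySem.List.pyRepeat_singleton]
    by_cases hcond : String.ofList t ≠ "" ∧
        String.ofList t = String.ofList (List.replicate (((String.ofList t).toList.length : Int)).toNat '#')
    · -- B returns a heading; A must agree
      rw [if_pos hcond]
      obtain ⟨htne', hrep'⟩ := hcond
      have htne : t ≠ [] := by
        intro h0; exact htne' (by rw [h0])
      have hrep : t = List.replicate t.length '#' := by
        have := congrArg String.toList hrep'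
        rw [String.toList_ofList, String.toList_ofList] at this
        simpa using this
      have hk1 : 1 ≤ t.length := List.length_pos_iff.2 htne
      have hLrep : L = List.replicate t.length '#' ++ ' ' :: rest := by rw [← hLt, ← hrep]
      have hcnt : pvCountHashes L = t.length := by
        rw [hLrep, pvCountHashes_replicate]
        simp [pvCountHashes]
      have hstart : PySem.Chars.startswith L ['#'] = true := by
        rw [PySem.Chars.startswith_iff, hLrep]
        obtain ⟨j, hj⟩ : ∃ j, t.length = j + 1 := ⟨t.length - 1, by omega⟩
        rw [hj, List.replicate_succ]
        exact ⟨List.replicate j '#' ++ ' ' :: rest, by simp⟩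
      rw [if_neg (by simp [hstart]), hcnt, if_neg]
      · simp [String.toList_ofList]
      · push_neg
        constructor
        · rw [hLrep]
          simp
        · rw [PySem.Chars.pyGet?_eq_listPyGet?, PySem.List.pyGet?_natCast, hLrep,
            List.getElem?_append_right (by simp)]
          simp
    · -- B returns none; A must too
      rw [if_neg hcond]
      by_cases hs : PySem.Chars.startswith L ['#'] = false
      · rw [if_pos hs]
      · rw [if_neg hs, if_pos]
        have hstart : ['#'] <+: L := by
          have := (PySem.Chars.startswith_iff L "#".toList).1 (by simpa using hs)
          simpa using this
        have hhead : L.head? = some '#' := by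
          obtain ⟨u, hu⟩ := hstart
          rw [← hu]; rfl
        have htne : t ≠ [] := by
          intro h0
          rw [h0] at hLt
          rw [← hLt] at hhead
          simp at hhead
        have hlen' : (((String.ofList t).toList.length : Int)).toNat = t.length := by
          simp [String.toList_ofList]
        have hex : ∃ x ∈ t, x ≠ '#' := by
          by_contra hno
          push_neg at hno
          refine hcond ⟨?_, ?_⟩
          · intro h0
            exact htne (by simpa [String.ext_iff, String.toList_ofList] using congrArg String.toList h0)
          · rw [hlen']
            exact congrArg String.ofList (List.eq_replicate_iff.2 ⟨rfl, hno⟩)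
        obtain ⟨x, hxmem, hxne⟩ := hex
        have hncnt : pvCountHashes L < t.length := by
          by_contra hge
          push_neg at hge
          obtain ⟨i, hi, hxi⟩ := List.getElem_of_mem hxmem
          have : L[i]? = some '#' := pvCountHashes_lt L i (by omega)
          rw [← hLt, List.getElem?_append_left hi, List.getElem?_eq_getElem hi, hxi] at this
          exact hxne (by simpa using this)
        right
        rw [PySem.Chars.pyGet?_eq_listPyGet?, PySem.List.pyGet?_natCast]
        obtain ⟨n, hn⟩ : ∃ n, pvCountHashes L = n := ⟨_, rfl⟩
        rw [hn] at hncnt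
        rw [hn, ← hLt, List.getElem?_append_left hncnt, List.getElem?_eq_getElem hncnt]
        intro hcontra
        exact htmem _ (List.getElem_mem hncnt) (by simpa using hcontra)

-- ===== VERDICT =====
set_option maxHeartbeats 1600000 in
theorem text_to_heading_type_spec : Claim_equal_text_to_heading_type := by
  intro text _
  unfold Spec_text_to_heading_type
  exact (pvCore (PySem.Str.strip text).toList :
    text_to_heading_type text = text_to_heading_type_alt text)
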